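-- pv_equiv track=rewrite | github.com/ZIYUANLI-star/MutaKernel | scripts/pilot_stress_test.py | pick_pilot_mutants
-- ===== SOURCE A (Python) =====
-- def pick_pilot_mutants(survived_list, n=5):
--     """Pick n mutants covering different operators."""
--     seen_ops = set()
--     picked = []
--
--     priority_ops = [
--         "stab_remove",      # C-class, expect Type 3 (value stress)
--         "cast_remove",       # C-class, expect Type 2 (dtype stress)
--         "sync_remove",       # B-class, expect Type 5 (repeated run)
--         "arith_replace",     # A-class, may be Type 1 or Type 3
--         "epsilon_modify",    # C-class, expect Type 3 (near_zero)
--     ]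
--
--     for target_op in priority_ops:
--         if len(picked) >= n:
--             break
--         for item in survived_list:
--             _, _, mm = item
--             if mm["operator_name"] == target_op and target_op not in seen_ops:
--                 picked.append(item)
--                 seen_ops.add(target_op)
--                 break
--
--     if len(picked) < n:
--         for item in survived_list:
--             if len(picked) >= n:
--                 break
--             _, _, mm = item
--             op = mm["operator_name"]
--             if op not in seen_ops:
--                 picked.append(item)
--                 seen_ops.add(op)
--
--     return picked
-- ===== SOURCE B (Python) =====
-- def pick_pilot_mutants(survived_list, n=5):
--     """Pick n mutants covering different operators."""
--     if n <= 0: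
--         return []
--     # index: first item per operator, in survived_list order
--     first_by_op = {}
--     for item in survived_list:
--         op = item[2]["operator_name"]
--         if op not in first_by_op:
--             first_by_op[op] = item
--     priority_ops = [
--         "stab_remove",
--         "cast_remove",
--         "sync_remove",
--         "arith_replace",
--         "epsilon_modify",
--     ]
--     picked = []
--     for op in priority_ops:
--         if len(picked) >= n:
--             break
--         if op in first_by_op:
--             picked.append(first_by_op.pop(op))
--     for item in first_by_op.values():
--         if len(picked) >= n:
--             break
--         picked.append(item)
--     return picked
-- ===== Notes on version B (the rewrite author's own statement) =====
-- stated objective: simpler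
-- what changed: A rescans survived_list once per priority operator and again for the fallback; B makes a single pass building an insertion-ordered first-item-per-operator dict, picks priority operators by dict lookup/pop, and drives the fallback from the remaining dict entries.
import Mathlib
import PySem

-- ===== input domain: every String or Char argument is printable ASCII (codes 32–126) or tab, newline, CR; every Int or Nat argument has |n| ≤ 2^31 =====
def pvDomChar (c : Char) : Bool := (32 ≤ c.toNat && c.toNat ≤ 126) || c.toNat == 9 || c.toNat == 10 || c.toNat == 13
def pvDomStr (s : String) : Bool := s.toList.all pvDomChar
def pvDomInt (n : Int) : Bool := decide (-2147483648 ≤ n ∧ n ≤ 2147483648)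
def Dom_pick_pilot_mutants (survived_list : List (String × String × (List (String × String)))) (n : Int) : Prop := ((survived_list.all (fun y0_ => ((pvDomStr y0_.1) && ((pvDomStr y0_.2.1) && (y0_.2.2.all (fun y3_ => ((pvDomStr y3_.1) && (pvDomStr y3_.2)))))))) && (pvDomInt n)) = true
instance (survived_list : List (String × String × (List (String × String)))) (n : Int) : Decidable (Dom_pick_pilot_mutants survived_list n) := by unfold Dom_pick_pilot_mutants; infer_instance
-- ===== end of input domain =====

-- B replaces A's five rescans of survived_list (one per priority operator) plus a separate
-- fallback scan by ONE indexing pass building first-item-per-operator, then pure lookups;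
-- objective: simpler/alternative. Equivalence is about the return value; neither mutates.

abbrev PvItem := String × String × (List (String × String))

-- mm["operator_name"]; total form: under Pre_ the key is present (getD default never read there)
def pvOp (item : PvItem) : String :=
  ((PySem.Dict.mk item.2.2).get? "operator_name").getD ""

def pvPriority : List String :=
  ["stab_remove", "cast_remove", "sync_remove", "arith_replace", "epsilon_modify"]

-- ===== PORT A =====
-- inner 'for item in survived_list: … break' of the priority loop
def pvAFind (t : String) (seen : PySem.Set String) (picked : List PvItem) :
    List PvItem → List PvItem × PySem.Set String
  | [] => (picked, seen)
  | it :: rest =>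
    if pvOp it == t && !(PySem.Set.contains seen t) then
      (picked ++ [it], PySem.Set.add seen t)
    else pvAFind t seen picked rest

-- 'for target_op in priority_ops: if len(picked) >= n: break …'
def pvALoop1 (sl : List PvItem) (n : Int) :
    List String → List PvItem × PySem.Set String → List PvItem × PySem.Set String
  | [], st => st
  | t :: ts, st =>
    if n ≤ (st.1.length : Int) then st
    else pvALoop1 sl n ts (pvAFind t st.2 st.1 sl)

-- fallback 'for item in survived_list: if len(picked) >= n: break …'
def pvALoop2 (n : Int) : List PvItem → List PvItem × PySem.Set String → List PvItem
  | [], st => st.1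
  | it :: rest, st =>
    if n ≤ (st.1.length : Int) then st.1
    else if PySem.Set.contains st.2 (pvOp it) then pvALoop2 n rest st
    else pvALoop2 n rest (st.1 ++ [it], PySem.Set.add st.2 (pvOp it))

def pick_pilot_mutants (survived_list : List (String × String × (List (String × String)))) (n : Int) : List (String × String × (List (String × String))) :=
  let st := pvALoop1 survived_list n pvPriority ([], PySem.Set.empty)
  if (st.1.length : Int) < n then pvALoop2 n survived_list st else st.1

-- ===== PORT B =====
-- 'for item in survived_list: op = item[2]["operator_name"]; if op not in first_by_op: first_by_op[op] = item'
def pvBuild : List PvItem → PySem.Dict String PvItem → PySem.Dict String PvItem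
  | [], d => d
  | it :: rest, d =>
    pvBuild rest (if d.contains (pvOp it) then d else d.insert (pvOp it) it)

-- 'for op in priority_ops: … if op in first_by_op: picked.append(first_by_op.pop(op))'
def pvBLoop1 (n : Int) :
    List String → List PvItem × PySem.Dict String PvItem → List PvItem × PySem.Dict String PvItem
  | [], st => st
  | t :: ts, st =>
    if n ≤ (st.1.length : Int) then st
    else
      match st.2.get? t with
      | some it => pvBLoop1 n ts (st.1 ++ [it], st.2.erase t)
      | none => pvBLoop1 n ts st

-- 'for item in first_by_op.values(): if len(picked) >= n: break; picked.append(item)'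
def pvBLoop2 (n : Int) : List (String × PvItem) → List PvItem → List PvItem
  | [], picked => picked
  | (_, it) :: rest, picked =>
    if n ≤ (picked.length : Int) then picked
    else pvBLoop2 n rest (picked ++ [it])

def pick_pilot_mutants_alt (survived_list : List (String × String × (List (String × String)))) (n : Int) : List (String × String × (List (String × String))) :=
  if n ≤ 0 then []
  else
    let fbo := pvBuild survived_list PySem.Dict.empty
    let st := pvBLoop1 n pvPriority ([], fbo)
    pvBLoop2 n st.2.items st.1

-- ===== PRECONDITION & SPEC =====
-- Pre_ excludes inputs (with n > 0) where some item's metadata dict lacks the key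
-- "operator_name": Python A raises KeyError there except when its early n-break happens to
-- stop the scan first — an accident of scan order B's single indexing pass does not share.
def Pre_pick_pilot_mutants (survived_list : List (String × String × (List (String × String)))) (n : Int) : Prop :=
  n ≤ 0 ∨ ∀ item ∈ survived_list, (PySem.Dict.mk item.2.2).contains "operator_name" = true
instance (survived_list : List (String × String × (List (String × String)))) (n : Int) : Decidable (Pre_pick_pilot_mutants survived_list n) := by unfold Pre_pick_pilot_mutants; infer_instance

def pvWitness_pick_pilot_mutants : (List (String × String × (List (String × String)))) × Int :=
  ([("m1", "s", [("operator_name", "cast_remove")]), ("m2", "s", [("operator_name", "xx")])], 2)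

def Spec_pick_pilot_mutants (survived_list : List (String × String × (List (String × String)))) (n : Int) (out : List (String × String × (List (String × String)))) : Prop := out = pick_pilot_mutants_alt survived_list n
instance (survived_list : List (String × String × (List (String × String)))) (n : Int) (out : List (String × String × (List (String × String)))) : Decidable (Spec_pick_pilot_mutants survived_list n out) := by unfold Spec_pick_pilot_mutants; infer_instance

-- ===== CLAIM (what is proved, stated in full; the proofs are below) =====
def Claim_equal_pick_pilot_mutants : Prop := ∀ (survived_list : List (String × String × (List (String × String)))) (n : Int), Dom_pick_pilot_mutants survived_list n → Pre_pick_pilot_mutants survived_list n → Spec_pick_pilot_mutants survived_list n (pick_pilot_mutants survived_list n)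

-- ===== LEMMAS AND PROOFS =====

-- first occurrence per operator, in order, skipping operators in `seen` (the common model)
def pvFO (seen : List String) : List PvItem → List (String × PvItem)
  | [] => []
  | it :: rest =>
    if seen.contains (pvOp it) then pvFO seen rest
    else (pvOp it, it) :: pvFO (seen ++ [pvOp it]) rest

theorem pvFO_congr (seen seen' : List String) (sl : List PvItem)
    (h : ∀ x, x ∈ seen ↔ x ∈ seen') : pvFO seen sl = pvFO seen' sl := by
  induction sl generalizing seen seen' with
  | nil => rfl
  | cons it rest ih =>
    have hc : seen.contains (pvOp it) = seen'.contains (pvOp it) := by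
      simp only [List.contains_eq_mem, h]
    simp only [pvFO, hc]
    by_cases hm : seen'.contains (pvOp it) = true
    · simp only [hm, if_true]; exact ih seen seen' h
    · simp only [Bool.not_eq_true] at hm
      simp only [hm, Bool.false_eq_true, if_false, List.cons.injEq, true_and]
      exact ih (seen ++ [pvOp it]) (seen' ++ [pvOp it]) (by intro x; simp [h x])

theorem pvFO_filter_mem (seen : List String) (sl : List PvItem) (t : String)
    (h : t ∈ seen) : (pvFO seen sl).filter (fun p => !(p.1 == t)) = pvFO seen sl := by
  induction sl generalizing seen with
  | nil => rfl
  | cons it rest ih =>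
    simp only [pvFO]
    by_cases hm : seen.contains (pvOp it) = true
    · simp only [hm, if_true]; exact ih seen h
    · simp only [Bool.not_eq_true] at hm
      have hne : pvOp it ≠ t := by
        intro he; rw [he] at hm; simp [List.contains_eq_mem, h] at hm
      simp only [hm, Bool.false_eq_true, if_false, List.filter_cons]
      have hb : (!(((pvOp it, it) : String × PvItem).1 == t)) = true := by simp [hne]
      rw [hb]
      simp only [if_true, List.cons.injEq, true_and]
      exact ih (seen ++ [pvOp it]) (by simp [h])

theorem pvFO_append (seen : List String) (sl : List PvItem) (t : String)
    (h : t ∉ seen) :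
    pvFO (seen ++ [t]) sl = (pvFO seen sl).filter (fun p => !(p.1 == t)) := by
  induction sl generalizing seen with
  | nil => rfl
  | cons it rest ih =>
    by_cases hm : seen.contains (pvOp it) = true
    · have hm' : (seen ++ [t]).contains (pvOp it) = true := by
        simp [List.contains_eq_mem] at hm ⊢; exact Or.inl hm
      simp only [pvFO, hm, hm', if_true]
      exact ih seen h
    · simp only [Bool.not_eq_true] at hm
      by_cases he : pvOp it = t
      · have hm' : (seen ++ [t]).contains (pvOp it) = true := by
          simp [List.contains_eq_mem, he]
        simp only [pvFO, hm, hm', if_true, Bool.false_eq_true, if_false,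
          List.filter_cons]
        rw [if_neg (by simp [he])]
        rw [show seen ++ [pvOp it] = seen ++ [t] by rw [he]]
        exact (pvFO_filter_mem (seen ++ [t]) rest t (by simp)).symm
      · have hm' : (seen ++ [t]).contains (pvOp it) = false := by
          simp [List.contains_eq_mem] at hm ⊢; exact ⟨hm, he⟩
        simp only [pvFO, hm, hm', Bool.false_eq_true, if_false, List.filter_cons]
        rw [if_pos (by simp [he])]
        rw [← ih (seen ++ [pvOp it]) (by
          intro hx
          rcases List.mem_append.mp hx with hx | hx
          · exact h hx
          · exact he (List.mem_singleton.mp hx).symm)]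
        simp only [List.cons.injEq, true_and]
        exact pvFO_congr _ _ rest
          (by intro x; simp only [List.mem_append, List.mem_singleton]; tauto)

-- A's inner scan computed by a lookup in the first-occurrence table
theorem pvAFind_eq (sl : List PvItem) (s seen : List String) (picked : List PvItem)
    (t : String) (hseen : seen.contains t = false) (hs : s.contains t = false) :
    pvAFind t seen picked sl =
      match (PySem.Dict.mk (pvFO s sl)).get? t with
      | some it => (picked ++ [it], seen ++ [t])
      | none => (picked, seen) := by
  induction sl generalizing s with
  | nil => simp [pvAFind, pvFO, PySem.Dict.get?]
  | cons it rest ih =>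
    simp only [pvFO]
    by_cases hm : s.contains (pvOp it) = true
    · have hne : (pvOp it == t) = false := by
        rcases Bool.eq_false_or_eq_true (pvOp it == t) with h | h
        · simp only [beq_iff_eq] at h; rw [h] at hm; rw [hm] at hs; cases hs
        · exact h
      simp only [pvAFind, hne, Bool.false_and, Bool.false_eq_true, if_false, hm, if_true]
      exact ih s hs
    · simp only [Bool.not_eq_true] at hm
      simp only [pvAFind, hm, Bool.false_eq_true, if_false, PySem.Dict.get?_mk_cons]
      by_cases he : (pvOp it == t) = true
      · have hsc : PySem.Set.contains seen t = false := hseen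
        simp only [he, Bool.true_and, hsc, Bool.not_false, if_true]
        have : PySem.Set.add seen t = seen ++ [t] := by
          unfold PySem.Set.add
          rw [show PySem.Set.contains seen t = false from hsc]
          rfl
        rw [this]
      · have he' : (pvOp it == t) = false := by simpa using he
        simp only [he', Bool.false_and, Bool.false_eq_true, if_false]
        refine ih (s ++ [pvOp it]) ?_
        have hne : pvOp it ≠ t := by intro hx; rw [hx] at he'; simp at he'
        simp [List.contains_eq_mem] at hs ⊢
        exact ⟨hs, fun hx => hne hx.symm⟩

-- the priority loops agree and leave related states
theorem pvLoop1_eq (sl : List PvItem) (n : Int) (ts : List String)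
    (picked : List PvItem) (seen : List String)
    (hts : ∀ t ∈ ts, seen.contains t = false) (hnd : ts.Nodup) :
    (pvALoop1 sl n ts (picked, seen)).1 =
      (pvBLoop1 n ts (picked, PySem.Dict.mk (pvFO seen sl))).1 ∧
    (pvBLoop1 n ts (picked, PySem.Dict.mk (pvFO seen sl))).2 =
      PySem.Dict.mk (pvFO (pvALoop1 sl n ts (picked, seen)).2 sl) := by
  induction ts generalizing picked seen with
  | nil => exact ⟨rfl, rfl⟩
  | cons t ts ih =>
    simp only [pvALoop1, pvBLoop1]
    by_cases hn : n ≤ (picked.length : Int)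
    · simp [hn]
    · simp only [hn, if_false]
      have hst : seen.contains t = false := hts t (by simp)
      rw [pvAFind_eq sl seen seen picked t hst hst]
      cases hg : (PySem.Dict.mk (pvFO seen sl)).get? t with
      | none =>
        exact ih picked seen (fun u hu => hts u (by simp [hu])) hnd.of_cons
      | some it =>
        have herase : (PySem.Dict.mk (pvFO seen sl)).erase t =
            PySem.Dict.mk (pvFO (seen ++ [t]) sl) := by
          have : (PySem.Dict.mk (pvFO seen sl)).erase t =
              PySem.Dict.mk ((pvFO seen sl).filter (fun p => !(p.1 == t))) := rfl
          rw [this, pvFO_append seen sl t (by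
            intro hmem; rw [List.contains_eq_mem] at hst; simp [hmem] at hst)]
        rw [herase]
        refine ih (picked ++ [it]) (seen ++ [t]) ?_ hnd.of_cons
        intro u hu
        have hne : u ≠ t := by
          intro he; subst he; exact (List.nodup_cons.mp hnd).1 hu
        have := hts u (by simp [hu])
        simp [List.contains_eq_mem] at this ⊢
        exact ⟨this, hne⟩

theorem pvBLoop2_of_full (n : Int) (l : List (String × PvItem)) (picked : List PvItem)
    (h : n ≤ (picked.length : Int)) : pvBLoop2 n l picked = picked := by
  cases l with
  | nil => rfl
  | cons p rest => cases p; simp [pvBLoop2, h]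

-- A's fallback scan is B's walk over the remaining table entries
theorem pvLoop2_eq (n : Int) (sl : List PvItem) (seen : List String)
    (picked : List PvItem) :
    pvALoop2 n sl (picked, seen) = pvBLoop2 n (pvFO seen sl) picked := by
  induction sl generalizing seen picked with
  | nil => rfl
  | cons it rest ih =>
    have hcast : PySem.Set.contains seen (pvOp it) = seen.contains (pvOp it) := rfl
    simp only [pvALoop2, pvFO, hcast]
    by_cases hm : seen.contains (pvOp it) = true
    · simp only [hm, if_true]
      by_cases hn : n ≤ (picked.length : Int)
      · simp only [hn, if_true]
        exact (pvBLoop2_of_full n _ picked hn).symm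
      · simp only [hn, if_false]
        exact ih seen picked
    · simp only [Bool.not_eq_true] at hm
      simp only [hm, Bool.false_eq_true, if_false, pvBLoop2]
      by_cases hn : n ≤ (picked.length : Int)
      · simp [hn]
      · simp only [hn, if_false]
        have hadd : PySem.Set.add seen (pvOp it) = seen ++ [pvOp it] := by
          unfold PySem.Set.add
          rw [show PySem.Set.contains seen (pvOp it) = false from hm]
          rfl
        rw [hadd]
        exact ih (seen ++ [pvOp it]) (picked ++ [it])

-- the one-pass index build computes the first-occurrence table
theorem pvBuild_eq (sl : List PvItem) (d : PySem.Dict String PvItem) :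
    pvBuild sl d = PySem.Dict.mk (d.items ++ pvFO d.keys sl) := by
  induction sl generalizing d with
  | nil => simp [pvBuild, pvFO]
  | cons it rest ih =>
    simp only [pvBuild]
    by_cases hc : d.contains (pvOp it) = true
    · have hk : d.keys.contains (pvOp it) = true := by
        rw [List.contains_eq_mem]
        simpa using (PySem.Dict.contains_iff_mem_keys _ _).mp hc
      simp only [hc, if_true, pvFO, hk, if_true]
      exact ih d
    · simp only [Bool.not_eq_true] at hc
      have hk : d.keys.contains (pvOp it) = false := by
        rw [List.contains_eq_mem]
        simp only [decide_eq_false_iff_not]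
        intro hmem
        rw [(PySem.Dict.contains_iff_mem_keys _ _).mpr hmem] at hc; cases hc
      simp only [hc, Bool.false_eq_true, if_false, pvFO, hk]
      rw [ih (d.insert (pvOp it) it),
        PySem.Dict.items_insert_of_not_contains _ _ hc,
        PySem.Dict.keys_insert_of_not_contains _ _ hc]
      simp

-- ===== VERDICT (by name: the statement is the Claim_ definition above) =====
theorem pick_pilot_mutants_spec : Claim_equal_pick_pilot_mutants := by
  intro sl n _ _
  unfold Spec_pick_pilot_mutants pick_pilot_mutants pick_pilot_mutants_alt
  by_cases hn0 : n ≤ 0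
  · have h1 : pvALoop1 sl n pvPriority ([], ([] : List String)) = ([], []) := by
      simp [pvPriority, pvALoop1, hn0]
    simp only [hn0, if_true]
    have h2 : pvALoop1 sl n pvPriority ([], PySem.Set.empty) = ([], PySem.Set.empty) := h1
    rw [h2, if_neg (by simp; omega)]
  · simp only [hn0, if_false]
    have hbuild : pvBuild sl PySem.Dict.empty = PySem.Dict.mk (pvFO [] sl) := by
      rw [pvBuild_eq sl PySem.Dict.empty]; rfl
    rw [hbuild]
    obtain ⟨h1, h2⟩ := pvLoop1_eq sl n pvPriority [] []
      (by intro t _; rfl) (by unfold pvPriority; decide)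
    set ast := pvALoop1 sl n pvPriority ([], PySem.Set.empty) with hast
    have hempty : (PySem.Set.empty : PySem.Set String) = ([] : List String) := rfl
    rw [hempty] at hast
    rw [h2, ← h1]
    by_cases hlt : (ast.1.length : Int) < n
    · simp only [hlt, if_true]
      exact pvLoop2_eq n sl ast.2 ast.1
    · simp only [hlt, if_false]
      exact (pvBLoop2_of_full n _ ast.1 (by omega)).symm
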